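-- pv_equiv track=rewrite | github.com/PWNAGERobotics/ScoutingPASS | scripts/BetterCSVParser.py | isolateTeleMisses
-- ===== SOURCE A (Python) =====
-- TELE_MISS_LOCS = 'Teleop Missing Locations'
--
-- CSV = list[list[str]]
--
-- isInMain = lambda mainCSV, h: h in mainCSV[0]
--
-- def findHeader(csv: CSV, header: str) -> int:
--     for i in range(len(csv[0])):
--         if csv[0][i] == header:
--             return i
--     return -1
--
-- def isolateTeleMisses(csv: CSV):
--     newCSV = CSV()
--     headers = ['Match Level', 'Match #', 'Team #', 'Score Location']
--     newCSV.append(headers)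
--     for i in range(1, len(csv)):
--         locations = csv[i][findHeader(csv, TELE_MISS_LOCS)].split(',')
--         if locations[0] == '':
--             continue
--         for location in locations:
--             newRow: list[str] = []
--             for header in headers:
--                 if isInMain(csv, header):
--                     newRow.append(csv[i][findHeader(csv, header)])
--                 else:
--                     newRow.append(location)
--             newCSV.append(newRow)
--     return newCSV
-- ===== SOURCE B (Python) =====
-- TELE_MISS_LOCS = 'Teleop Missing Locations'
--
-- def isolateTeleMisses(csv):
--     headers = ['Match Level', 'Match #', 'Team #', 'Score Location']
--     head = csv[0] if csv else []
--     miss = head.index(TELE_MISS_LOCS) if TELE_MISS_LOCS in head else -1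
--     # pass 1: keep each data row together with its split locations
--     kept = []
--     for row in csv[1:]:
--         locs = row[miss].split(',')
--         if locs[0] != '':
--             kept.append((row, locs))
--     # pass 2: build the table COLUMN by COLUMN — a header present in the header row
--     # contributes its cell value repeated once per location, an absent header
--     # contributes the locations themselves — then zip the columns back into rows
--     def column(h):
--         if h in head:
--             j = head.index(h)
--             return [row[j] for row, locs in kept for _ in locs]
--         return [loc for _, locs in kept for loc in locs]
--     c0, c1, c2, c3 = (column(h) for h in headers)
--     return [headers] + [[a, b, c, d] for a, b, c, d in zip(c0, c1, c2, c3)]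
-- ===== Notes on version B (the rewrite author's own statement) =====
-- stated objective: faster
-- what changed: A builds the output row by row, re-running a linear findHeader scan over the header row for every header inside the innermost per-location loop; B is column-major: it collects the kept (row, locations) pairs once, builds each of the four output columns in full (a present header's cell repeated per location, or the location stream itself), and zips the columns back into rows.
import Mathlib
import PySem

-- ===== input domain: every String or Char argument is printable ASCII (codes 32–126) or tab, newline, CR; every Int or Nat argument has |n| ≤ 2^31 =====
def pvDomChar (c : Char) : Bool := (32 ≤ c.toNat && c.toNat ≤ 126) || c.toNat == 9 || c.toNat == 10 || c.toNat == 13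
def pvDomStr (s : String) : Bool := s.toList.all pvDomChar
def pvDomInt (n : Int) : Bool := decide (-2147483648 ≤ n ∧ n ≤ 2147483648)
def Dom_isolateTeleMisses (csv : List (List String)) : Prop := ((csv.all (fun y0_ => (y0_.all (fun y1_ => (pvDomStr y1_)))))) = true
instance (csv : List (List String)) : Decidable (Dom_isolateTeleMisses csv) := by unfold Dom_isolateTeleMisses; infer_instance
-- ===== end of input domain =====

-- B builds the table column-major — kept (row, locations) pairs first, then each output
-- column in full, then zip the columns back into rows (measured faster: no per-cell header scan).
-- ===== PORT A =====
-- findHeader's scan 'for i in range(len(csv[0])): if csv[0][i] == header: return i' / 'return -1'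
def pvFindLoop (row0 : List String) (header : String) : List Int → Int
  | [] => -1
  | i :: rest =>
      if PySem.List.pyGetD row0 i "" = header then i else pvFindLoop row0 header rest

def pvFindHeader (csv : List (List String)) (header : String) : Int :=
  pvFindLoop (PySem.List.pyGetD csv 0 []) header
    (PySem.List.pyRange 0 (PySem.List.len (PySem.List.pyGetD csv 0 [])))

def isolateTeleMisses (csv : List (List String)) : List (List String) :=
  let headers : List String := ["Match Level", "Match #", "Team #", "Score Location"]
  (PySem.List.pyRange 1 (PySem.List.len csv)).foldl (fun newCSV i =>
    let row := PySem.List.pyGetD csv i []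
    let locations :=
      (PySem.Str.split? (PySem.List.pyGetD row (pvFindHeader csv "Teleop Missing Locations") "") ",").getD []
    if PySem.List.pyGetD locations 0 "" = "" then newCSV
    else locations.foldl (fun acc location =>
      acc ++ [headers.foldl (fun newRow header =>
        newRow ++ [if header ∈ PySem.List.pyGetD csv 0 [] then
                     PySem.List.pyGetD row (pvFindHeader csv header) ""
                   else location]) []]) newCSV) [headers]

-- ===== PORT B =====
-- 'zip(c0, c1, c2, c3)' made into 4-row lists (truncates at the shortest, as zip does)
def pvZip4 : List String → List String → List String → List String → List (List String)
  | a :: as, b :: bs, c :: cs, d :: ds => [a, b, c, d] :: pvZip4 as bs cs ds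
  | _, _, _, _ => []

def isolateTeleMisses_alt (csv : List (List String)) : List (List String) :=
  let headers : List String := ["Match Level", "Match #", "Team #", "Score Location"]
  let head : List String := if csv ≠ [] then PySem.List.pyGetD csv 0 [] else []
  let miss : Int :=
    if "Teleop Missing Locations" ∈ head then
      (((PySem.List.index? head "Teleop Missing Locations").getD 0 : Nat) : Int)
    else -1
  let kept : List (List String × List String) :=
    (PySem.List.slice csv (some 1) none).foldl (fun acc row =>
      let locs := (PySem.Str.split? (PySem.List.pyGetD row miss "") ",").getD []
      if PySem.List.pyGetD locs 0 "" ≠ "" then acc ++ [(row, locs)] else acc) []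
  let column : String → List String := fun h =>
    if h ∈ head then
      let j : Int := (((PySem.List.index? head h).getD 0 : Nat) : Int)
      kept.flatMap (fun rl => rl.2.map (fun _ => PySem.List.pyGetD rl.1 j ""))
    else kept.flatMap (fun rl => rl.2)
  let c0 := column "Match Level"
  let c1 := column "Match #"
  let c2 := column "Team #"
  let c3 := column "Score Location"
  [headers] ++ pvZip4 c0 c1 c2 c3

-- ===== PRECONDITION & SPEC =====
-- the column index of the teleop-miss header in the header row, -1 when absent (as A's findHeader)
def pvPreMiss (hd : List String) : Int :=
  match PySem.List.index? hd "Teleop Missing Locations" with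
  | some j => (j : Int)
  | none => -1

-- Pre_ excludes exactly the inputs where A raises IndexError: a data row on which the
-- teleop-miss column index (-1 when that header is absent) is out of range, or, when that row is
-- actually expanded (its first split location is nonempty), a row too short for the column index
-- of one of the four output headers present in the header row.
def Pre_isolateTeleMisses (csv : List (List String)) : Prop :=
  ∀ row ∈ csv.tail,
    PySem.Raise.InRange row.length (pvPreMiss csv.headI) ∧
    (((PySem.Str.split? (PySem.List.pyGetD row (pvPreMiss csv.headI) "") ",").getD []).headD "" ≠ "" →
      ∀ h ∈ (["Match Level", "Match #", "Team #", "Score Location"] : List String),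
        h ∈ csv.headI → (PySem.List.index? csv.headI h).getD 0 < row.length)
instance (csv : List (List String)) : Decidable (Pre_isolateTeleMisses csv) := by
  unfold Pre_isolateTeleMisses; infer_instance

def pvWitness_isolateTeleMisses : List (List String) :=
  [["Teleop Missing Locations", "Match Level", "Match #", "Team #", "Score Location"],
   ["a,b", "Q", "1", "254", "X"],
   ["", "Q", "2", "5", "Y"]]

def Spec_isolateTeleMisses (csv : List (List String)) (out : List (List String)) : Prop := out = isolateTeleMisses_alt csv
instance (csv : List (List String)) (out : List (List String)) : Decidable (Spec_isolateTeleMisses csv out) := by unfold Spec_isolateTeleMisses; infer_instance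

-- ===== CLAIM (what is proved, stated in full; the proofs are below) =====
def Claim_equal_isolateTeleMisses : Prop := ∀ (csv : List (List String)), Dom_isolateTeleMisses csv → Pre_isolateTeleMisses csv → Spec_isolateTeleMisses csv (isolateTeleMisses csv)

-- ===== LEMMAS AND PROOFS =====
def pvHs : List String := ["Match Level", "Match #", "Team #", "Score Location"]

def pvMissB (head : List String) : Int :=
  if "Teleop Missing Locations" ∈ head then
    (((PySem.List.index? head "Teleop Missing Locations").getD 0 : Nat) : Int)
  else -1

def pvLocs (hd row : List String) : List String :=
  (PySem.Str.split? (PySem.List.pyGetD row (pvMissB hd) "") ",").getD []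

-- optional column index of header h in hd, as B resolves it
def pvJ (hd : List String) (h : String) : Option Int :=
  if h ∈ hd then some (((PySem.List.index? hd h).getD 0 : Nat) : Int) else none

def pvPick (row : List String) (loc : String) : Option Int → String
  | some j => PySem.List.pyGetD row j ""
  | none => loc

def pvPiece (row locs : List String) : Option Int → List String
  | some j => locs.map (fun _ => PySem.List.pyGetD row j "")
  | none => locs

def pvCol (kept : List (List String × List String)) (j? : Option Int) : List String :=
  kept.flatMap (fun rl => pvPiece rl.1 rl.2 j?)

-- A's per-row loop body, named (defeq to the lambda in the port)
def pvBodyA (csv : List (List String)) (newCSV : List (List String)) (row : List String) :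
    List (List String) :=
  let locations :=
    (PySem.Str.split? (PySem.List.pyGetD row (pvFindHeader csv "Teleop Missing Locations") "") ",").getD []
  if PySem.List.pyGetD locations 0 "" = "" then newCSV
  else locations.foldl (fun acc location =>
    acc ++ [pvHs.foldl (fun newRow header =>
      newRow ++ [if header ∈ PySem.List.pyGetD csv 0 [] then
                   PySem.List.pyGetD row (pvFindHeader csv header) ""
                 else location]) []]) newCSV

-- B's kept-rows loop, named (defeq to the loop in the port)
def pvKept (hd : List String) (rows : List (List String)) : List (List String × List String) :=
  rows.foldl (fun acc row =>
    if PySem.List.pyGetD (pvLocs hd row) 0 "" ≠ "" then acc ++ [(row, pvLocs hd row)] else acc) []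

theorem pvA_eq (csv : List (List String)) :
    isolateTeleMisses csv =
      (PySem.List.pyRange 1 (PySem.List.len csv)).foldl
        (fun acc i => pvBodyA csv acc (PySem.List.pyGetD csv i [])) [pvHs] := rfl

theorem pvB_eq (hd : List String) (rows : List (List String)) :
    isolateTeleMisses_alt (hd :: rows) =
      [pvHs] ++ pvZip4
        (if "Match Level" ∈ hd then
          (pvKept hd rows).flatMap (fun rl => rl.2.map (fun _ =>
            PySem.List.pyGetD rl.1 ((((PySem.List.index? hd "Match Level").getD 0 : Nat) : Int)) ""))
        else (pvKept hd rows).flatMap (fun rl => rl.2))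
        (if "Match #" ∈ hd then
          (pvKept hd rows).flatMap (fun rl => rl.2.map (fun _ =>
            PySem.List.pyGetD rl.1 ((((PySem.List.index? hd "Match #").getD 0 : Nat) : Int)) ""))
        else (pvKept hd rows).flatMap (fun rl => rl.2))
        (if "Team #" ∈ hd then
          (pvKept hd rows).flatMap (fun rl => rl.2.map (fun _ =>
            PySem.List.pyGetD rl.1 ((((PySem.List.index? hd "Team #").getD 0 : Nat) : Int)) ""))
        else (pvKept hd rows).flatMap (fun rl => rl.2))
        (if "Score Location" ∈ hd then
          (pvKept hd rows).flatMap (fun rl => rl.2.map (fun _ =>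
            PySem.List.pyGetD rl.1 ((((PySem.List.index? hd "Score Location").getD 0 : Nat) : Int)) ""))
        else (pvKept hd rows).flatMap (fun rl => rl.2)) := by
  unfold isolateTeleMisses_alt pvKept pvLocs pvMissB pvHs
  simp only [PySem.List.slice_from_one, List.tail_cons, ne_eq, reduceCtorEq,
    not_false_eq_true, if_true, PySem.List.pyGetD_zero_cons]

-- A's findHeader scan returns the first index of the header, -1 when absent
theorem pvFindLoop_eq (hd : List String) (h : String) : ∀ (k : Nat),
    pvFindLoop hd h (PySem.List.pyRange (k : Int) (hd.length : Int)) =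
      (match PySem.List.index? (hd.drop k) h with
       | some j => ((k + j : Nat) : Int)
       | none => -1) := by
  intro k
  induction hk : hd.length - k generalizing k with
  | zero =>
      have hle : hd.length ≤ k := by omega
      rw [PySem.List.pyRange_one_eq_nil (by exact_mod_cast hle)]
      rw [List.drop_eq_nil_of_le hle]
      have : PySem.List.index? ([] : List String) h = none :=
        (PySem.List.index?_eq_none_iff _ _).mpr (by simp)
      simp [pvFindLoop]
  | succ n ih =>
      have hlt : k < hd.length := by omega
      rw [PySem.List.pyRange_one_cons (by exact_mod_cast hlt)]
      rw [List.drop_eq_getElem_cons hlt]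
      show (if PySem.List.pyGetD hd (k : Int) "" = h then (k : Int)
            else pvFindLoop hd h (PySem.List.pyRange ((k : Int) + 1) (hd.length : Int))) = _
      rw [PySem.List.pyGetD_ofNat hd k "" hlt]
      by_cases heq : hd[k] = h
      · rw [if_pos heq, heq, PySem.List.index?_cons_self]
        simp
      · rw [if_neg heq, PySem.List.index?_cons_of_ne _ heq]
        rw [show ((k : Int) + 1) = ((k + 1 : Nat) : Int) by push_cast; ring]
        rw [ih (k + 1) (by omega)]
        cases hidx : PySem.List.index? (hd.drop (k + 1)) h
        · simp
        · simp only [Option.map_some]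
          push_cast; ring

theorem pvFindHeader_eq (hd : List String) (rows : List (List String)) (h : String) :
    pvFindHeader (hd :: rows) h =
      (match PySem.List.index? hd h with
       | some j => (j : Int)
       | none => -1) := by
  have := pvFindLoop_eq hd h 0
  rw [Nat.cast_zero] at this
  simp only [List.drop_zero, Nat.zero_add] at this
  unfold pvFindHeader
  simp only [PySem.List.pyGetD_zero_cons, PySem.List.len_eq]
  exact this

theorem pvFindHeader_eq_miss (hd : List String) (rows : List (List String)) :
    pvFindHeader (hd :: rows) "Teleop Missing Locations" = pvMissB hd := by
  rw [pvFindHeader_eq]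
  unfold pvMissB
  by_cases hm : "Teleop Missing Locations" ∈ hd
  · rcases Option.isSome_iff_exists.mp ((PySem.List.index?_isSome_iff _ _).mpr hm) with ⟨j, hj⟩
    rw [hj, if_pos hm]
    simp
  · rw [(PySem.List.index?_eq_none_iff _ _).mpr hm, if_neg hm]

-- A's per-header cell equals B's pick through the resolved optional column index
theorem pvCell_eq (hd : List String) (rows : List (List String)) (row : List String)
    (loc h : String) :
    (if h ∈ hd then PySem.List.pyGetD row (pvFindHeader (hd :: rows) h) "" else loc) =
      pvPick row loc (pvJ hd h) := by
  unfold pvJ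
  by_cases hm : h ∈ hd
  · rcases Option.isSome_iff_exists.mp ((PySem.List.index?_isSome_iff _ _).mpr hm) with ⟨j, hj⟩
    rw [if_pos hm, if_pos hm, pvFindHeader_eq, hj]
    simp [pvPick]
  · rw [if_neg hm, if_neg hm]; rfl

theorem pvPiece_cons (row : List String) (l : String) (ls : List String) (j? : Option Int) :
    pvPiece row (l :: ls) j? = pvPick row l j? :: pvPiece row ls j? := by
  cases j? <;> rfl

theorem pvPiece_length (row locs : List String) (j? : Option Int) :
    (pvPiece row locs j?).length = locs.length := by
  cases j? <;> simp [pvPiece]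

theorem pvZip4_append (as bs cs ds as' bs' cs' ds' : List String)
    (h1 : as.length = bs.length) (h2 : as.length = cs.length) (h3 : as.length = ds.length) :
    pvZip4 (as ++ as') (bs ++ bs') (cs ++ cs') (ds ++ ds') =
      pvZip4 as bs cs ds ++ pvZip4 as' bs' cs' ds' := by
  induction as generalizing bs cs ds with
  | nil =>
      cases bs <;> cases cs <;> cases ds <;> simp_all [pvZip4]
  | cons a as ih =>
      cases bs with
      | nil => simp at h1
      | cons b bs =>
        cases cs with
        | nil => simp at h2
        | cons c cs =>
          cases ds with
          | nil => simp at h3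
          | cons d ds =>
            simp only [List.cons_append, pvZip4]
            rw [ih bs cs ds (by simpa using h1) (by simpa using h2) (by simpa using h3)]

theorem pvZip4_pieces (row : List String) (j0 j1 j2 j3 : Option Int) (locs : List String) :
    pvZip4 (pvPiece row locs j0) (pvPiece row locs j1) (pvPiece row locs j2) (pvPiece row locs j3) =
      locs.map (fun loc => [pvPick row loc j0, pvPick row loc j1, pvPick row loc j2, pvPick row loc j3]) := by
  induction locs with
  | nil => cases j0 <;> cases j1 <;> cases j2 <;> cases j3 <;> rfl
  | cons l ls ih =>
      rw [pvPiece_cons, pvPiece_cons, pvPiece_cons, pvPiece_cons]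
      simp only [pvZip4, List.map_cons, ih]

-- zipping the four columns recovers the row-major expansion of the kept rows
theorem pvZip4_cols (kept : List (List String × List String)) (j0 j1 j2 j3 : Option Int) :
    pvZip4 (pvCol kept j0) (pvCol kept j1) (pvCol kept j2) (pvCol kept j3) =
      kept.flatMap (fun rl => rl.2.map (fun loc =>
        [pvPick rl.1 loc j0, pvPick rl.1 loc j1, pvPick rl.1 loc j2, pvPick rl.1 loc j3])) := by
  induction kept with
  | nil => rfl
  | cons rl rest ih =>
      simp only [pvCol, List.flatMap_cons]
      rw [pvZip4_append _ _ _ _ _ _ _ _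
        (by rw [pvPiece_length, pvPiece_length])
        (by rw [pvPiece_length, pvPiece_length])
        (by rw [pvPiece_length, pvPiece_length])]
      rw [pvZip4_pieces]
      exact congrArg _ ih

-- B's per-header column is pvCol of the resolved optional index
theorem pvColumn_eq (hd : List String) (kept : List (List String × List String)) (h : String) :
    (if h ∈ hd then
      kept.flatMap (fun rl => rl.2.map (fun _ =>
        PySem.List.pyGetD rl.1 ((((PySem.List.index? hd h).getD 0 : Nat) : Int)) ""))
    else kept.flatMap (fun rl => rl.2)) = pvCol kept (pvJ hd h) := by
  unfold pvCol pvJ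
  by_cases hm : h ∈ hd <;> simp [hm, pvPiece]

theorem pvKept_eq (hd : List String) (rows : List (List String)) :
    pvKept hd rows =
      (rows.filter (fun row => decide (PySem.List.pyGetD (pvLocs hd row) 0 "" ≠ ""))).map
        (fun row => (row, pvLocs hd row)) := by
  unfold pvKept
  rw [PySem.List.foldl_append_ite
    (p := fun row => PySem.List.pyGetD (pvLocs hd row) 0 "" ≠ "")
    (f := fun row => (row, pvLocs hd row))]
  rfl

theorem pvFlatMap_if {α β : Type} (l : List α) (c : α → Prop) [DecidablePred c] (g : α → List β) :
    l.flatMap (fun x => if c x then [] else g x) =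
      (l.filter (fun x => decide (¬ c x))).flatMap g := by
  induction l with
  | nil => rfl
  | cons x xs ih =>
      by_cases hx : c x <;> simp [hx, ih]

-- A flattened: header row, then per kept data row the per-location rows
theorem pvA_flat (hd : List String) (rows : List (List String)) :
    isolateTeleMisses (hd :: rows) =
      [pvHs] ++ rows.flatMap (fun row =>
        if PySem.List.pyGetD (pvLocs hd row) 0 "" = "" then []
        else (pvLocs hd row).map (fun loc =>
          pvHs.map (fun h => pvPick row loc (pvJ hd h)))) := by
  rw [pvA_eq]
  rw [PySem.List.foldl_pyRange_pyGetD (hd :: rows) []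
    (fun acc row => pvBodyA (hd :: rows) acc row) [pvHs] (a := 1) (by norm_num)]
  simp only [show ((1 : Int)).toNat = 1 from rfl, List.drop_succ_cons, List.drop_zero]
  have hbody : ∀ (acc : List (List String)) (row : List String),
      pvBodyA (hd :: rows) acc row =
      acc ++ (if PySem.List.pyGetD (pvLocs hd row) 0 "" = "" then []
        else (pvLocs hd row).map (fun loc => pvHs.map (fun h => pvPick row loc (pvJ hd h)))) := by
    intro acc row
    unfold pvBodyA
    have hloc : (PySem.Str.split? (PySem.List.pyGetD row (pvFindHeader (hd :: rows) "Teleop Missing Locations") "") ",").getD []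
        = pvLocs hd row := by rw [pvFindHeader_eq_miss]; rfl
    simp only [hloc]
    split
    · simp
    · rw [PySem.List.foldl_append_singleton_eq_map]
      congr 1
      apply List.map_congr_left
      intro loc _
      rw [PySem.List.foldl_append_singleton_eq_map, List.nil_append]
      apply List.map_congr_left
      intro h _
      simp only [PySem.List.pyGetD_zero_cons]
      exact pvCell_eq hd rows row loc h
  calc rows.foldl (fun acc row => pvBodyA (hd :: rows) acc row) [pvHs]
      = rows.foldl (fun acc row => acc ++
          (if PySem.List.pyGetD (pvLocs hd row) 0 "" = "" then []
           else (pvLocs hd row).map (fun loc => pvHs.map (fun h => pvPick row loc (pvJ hd h))))) [pvHs] := by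
        apply PySem.List.foldl_congr_mem
        intro acc row _
        exact hbody acc row
    _ = _ := PySem.List.foldl_append_eq_flatMap _ _ _

theorem ports_eq (csv : List (List String)) :
    isolateTeleMisses csv = isolateTeleMisses_alt csv := by
  rcases csv with _ | ⟨hd, rows⟩
  · decide
  · rw [pvA_flat, pvB_eq]
    rw [pvColumn_eq hd _ "Match Level", pvColumn_eq hd _ "Match #",
        pvColumn_eq hd _ "Team #", pvColumn_eq hd _ "Score Location"]
    rw [pvZip4_cols, pvKept_eq, List.flatMap_map]
    rw [pvFlatMap_if rows (fun row => PySem.List.pyGetD (pvLocs hd row) 0 "" = "")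
      (g := fun row => (pvLocs hd row).map (fun loc => pvHs.map (fun h => pvPick row loc (pvJ hd h))))]
    rfl

-- ===== VERDICT (by name: the statement is the Claim_ definition above) =====
theorem isolateTeleMisses_spec : Claim_equal_isolateTeleMisses := by
  intro csv _ _
  unfold Spec_isolateTeleMisses
  exact ports_eq csv
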